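-- pv_equiv track=rewrite | github.com/yehudav/Project-Euler | 0062.py | get_cubes
-- ===== SOURCE A (Python) =====
-- def get_cubes(bound):
--     lis = []
--     cur = 1
--     cur_jmp = 7
--     next = 12
--     while cur <= bound:
--         lis.append(cur)
--         cur += cur_jmp
--         cur_jmp += next
--         next += 6
--     return lis
-- ===== SOURCE B (Python) =====
-- def get_cubes(bound):
--     lis = []
--     n = 1
--     while n ** 3 <= bound:
--         lis.append(n ** 3)
--         n += 1
--     return lis
-- ===== Notes on version B (the rewrite author's own statement) =====
-- stated objective: simpler
-- what changed: Replaces A's finite-difference state machine (cur, cur_jmp, next updated each step) with a single counter n whose cube n**3 is computed directly each iteration.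
import Mathlib
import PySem

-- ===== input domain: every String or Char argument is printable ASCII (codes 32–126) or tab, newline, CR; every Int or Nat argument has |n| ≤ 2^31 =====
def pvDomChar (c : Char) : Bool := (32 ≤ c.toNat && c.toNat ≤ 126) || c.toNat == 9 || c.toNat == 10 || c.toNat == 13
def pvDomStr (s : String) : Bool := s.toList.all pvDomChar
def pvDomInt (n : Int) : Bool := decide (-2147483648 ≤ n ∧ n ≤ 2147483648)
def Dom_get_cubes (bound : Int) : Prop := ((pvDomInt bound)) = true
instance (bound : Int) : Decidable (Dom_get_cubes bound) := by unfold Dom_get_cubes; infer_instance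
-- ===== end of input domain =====

-- B replaces A's finite-difference state machine with a counter n and a direct n**3; objective: simpler.
-- ===== PORT A =====
-- while loop of A: state (cur, cur_jmp, next); positivity hypotheses make the loop total (termination only)
def get_cubesLoopA (bound cur jmp nxt : Int) (hj : 0 < jmp) (hn : 0 ≤ nxt) : List Int :=
  if h : cur ≤ bound then
    cur :: get_cubesLoopA bound (cur + jmp) (jmp + nxt) (nxt + 6)
      (by omega) (by omega)
  else []
termination_by (bound + 1 - cur).toNat
decreasing_by omega

def get_cubes (bound : Int) : List Int :=
  get_cubesLoopA bound 1 7 12 (by omega) (by omega)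

-- ===== PORT B =====
-- while loop of B: counter n, cube computed directly (hypothesis 1 ≤ n for termination only)
def get_cubesLoopB (bound n : Int) (hn : 1 ≤ n) : List Int :=
  if h : n ^ 3 ≤ bound then
    n ^ 3 :: get_cubesLoopB bound (n + 1) (by omega)
  else []
termination_by (bound + 1 - n ^ 3).toNat
decreasing_by
  have h1 : n ^ 3 < (n + 1) ^ 3 := by nlinarith
  omega

def get_cubes_alt (bound : Int) : List Int :=
  get_cubesLoopB bound 1 (by omega)

-- ===== PRECONDITION & SPEC =====
def Spec_get_cubes (bound : Int) (out : List Int) : Prop := out = get_cubes_alt bound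
instance (bound : Int) (out : List Int) : Decidable (Spec_get_cubes bound out) := by unfold Spec_get_cubes; infer_instance

-- ===== CLAIM (what is proved, stated in full; the proofs are below) =====
def Claim_equal_get_cubes : Prop := ∀ (bound : Int), Dom_get_cubes bound → Spec_get_cubes bound (get_cubes bound)

-- ===== LEMMAS AND PROOFS =====
-- invariant: A's state at step n is (cur, jmp, nxt) = (n^3, 3n^2+3n+1, 6n+6)
theorem get_cubesLoop_eq (bound : Int) : ∀ (k : Nat) (n cur jmp nxt : Int)
    (hj : 0 < jmp) (hx : 0 ≤ nxt) (hn : 1 ≤ n),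
    cur = n ^ 3 → jmp = 3 * n ^ 2 + 3 * n + 1 → nxt = 6 * n + 6 →
    (bound + 1 - cur).toNat ≤ k →
    get_cubesLoopA bound cur jmp nxt hj hx = get_cubesLoopB bound n hn := by
  intro k
  induction k with
  | zero =>
    intro n cur jmp nxt hj hx hn e1 e2 e3 hk
    subst e1 e2 e3
    rw [get_cubesLoopA, get_cubesLoopB]
    have h1 : ¬ n ^ 3 ≤ bound := by omega
    simp [h1]
  | succ k ih =>
    intro n cur jmp nxt hj hx hn e1 e2 e3 hk
    subst e1 e2 e3
    rw [get_cubesLoopA, get_cubesLoopB]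
    by_cases h : n ^ 3 ≤ bound
    · simp only [h, dite_true]
      refine congrArg _ ?_
      exact ih (n + 1) _ _ _ _ _ (by omega) (by ring) (by ring) (by ring)
        (by have : n ^ 3 < (n + 1) ^ 3 := by nlinarith
            omega)
    · simp [h]

-- ===== VERDICT (by name: the statement is the Claim_ definition above) =====
theorem get_cubes_spec : Claim_equal_get_cubes := by
  intro bound _
  unfold Spec_get_cubes get_cubes get_cubes_alt
  exact get_cubesLoop_eq bound (bound + 1 - 1).toNat 1 1 7 12 (by omega) (by omega)
    (by omega) (by norm_num) (by norm_num) (by norm_num) (by omega)
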